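-- pv_equiv track=rewrite | github.com/euhmeuh/fxpq | fxpqeditor/tools.py | ascii_to_xbm
-- ===== SOURCE A (Python) =====
-- def partition(iterable, chunksize):
--     """Partition an iterable into chunks of the given size"""
--     return [iterable[i:i + chunksize] for i in range(0, len(iterable), chunksize)]
--
-- def ascii_to_xbm(string, black='#', white=' '):
--     """Generate a XBM image from an ascii art string"""
--
--     # purify input by removing all empty lines
--     # and all lines that contains illegal characters
--     lines = []
--     for line in string.split('\n'):
--         if not line:
--             continue
--         if not all([c in (black, white) for c in line]):
--             continue
--         lines.append(line)
--
--     width = len(max(lines, key=len))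
--     height = len(lines)
--
--     # fill incomplete lines with spaces
--     lines = map(lambda l: l.ljust(width, white), lines)
--     lines = "".join(lines)
--
--     databytes = []
--     for chunk in partition(lines, 8):
--         byte = 0x00
--         for i, char in enumerate(chunk, start=0):
--             if char == black:
--                 byte += 2 ** i
--         databytes.append(format(byte, '#04x'))
--
--     result = """
--     #define im_width {0}
--     #define im_height {1}
--     static char im_bits[] = {{\n{2}\n}};
--     """
--     return result.format(width, height, ",".join(databytes))
-- ===== SOURCE B (Python) =====
-- def ascii_to_xbm(string, black='#', white=' '):
--     """Generate a XBM image from an ascii art string"""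
--
--     # keep only non-empty lines made entirely of black/white characters
--     lines = [l for l in string.split('\n')
--              if l and all(c == black or c == white for c in l)]
--
--     width = len(max(lines, key=len))
--     height = len(lines)
--     total = width * height
--
--     # no padded stream is ever built: the b-th bit of byte j corresponds to
--     # global cell i = 8*j + b, addressed directly as row i // width and
--     # column i % width; columns beyond a line's end are the white fill
--     def byte_at(j):
--         byte = 0
--         for b in range(8):
--             i = 8 * j + b
--             if i < total:
--                 line = lines[i // width]
--                 col = i % width
--                 char = line[col] if col < len(line) else white
--                 if char == black:
--                     byte += 1 << b
--         return byte
--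
--     databytes = [format(byte_at(j), '#04x') for j in range((total + 7) // 8)]
--
--     return ("\n    #define im_width {0}\n    #define im_height {1}\n"
--             "    static char im_bits[] = {{\n{2}\n}};\n    ").format(
--                 width, height, ",".join(databytes))
-- ===== Notes on version B (the rewrite author's own statement) =====
-- stated objective: alternative
-- what changed: B never builds the padded character stream at all: instead of A's join-then-slice-into-8-chunks with an inner enumerate loop, B computes each output byte independently, mapping its bit index i to the 2D cell (i // width, i % width) and reading the original (unpadded) lines directly, with columns beyond a line's end standing for the white fill.
import Mathlib
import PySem

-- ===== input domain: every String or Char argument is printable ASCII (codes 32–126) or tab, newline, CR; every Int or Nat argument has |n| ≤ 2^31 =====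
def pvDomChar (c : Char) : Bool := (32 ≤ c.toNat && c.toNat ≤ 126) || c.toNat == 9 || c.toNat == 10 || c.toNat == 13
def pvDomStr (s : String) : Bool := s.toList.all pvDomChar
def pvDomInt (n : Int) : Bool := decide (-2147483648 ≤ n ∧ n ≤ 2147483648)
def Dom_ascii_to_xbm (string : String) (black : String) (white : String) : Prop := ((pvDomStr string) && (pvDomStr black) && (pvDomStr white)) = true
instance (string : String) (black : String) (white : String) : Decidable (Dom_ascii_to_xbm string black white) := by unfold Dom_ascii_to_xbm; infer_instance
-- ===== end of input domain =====

-- B never builds the padded character stream: it addresses each bit's cell directly as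
-- row i // width, column i % width, computing every byte independently by index arithmetic
-- (objective: alternative decomposition, same cost).

-- ===== PORT A =====

-- format(b, '#04x'); exact for 0 ≤ b < 256, the only values either program formats
def pvHexDigit (n : Nat) : Char :=
  ['0','1','2','3','4','5','6','7','8','9','a','b','c','d','e','f'].getD n '0'
def pvFmtByte (b : Int) : List Char :=
  ['0', 'x', pvHexDigit (b.toNat / 16), pvHexDigit (b.toNat % 16)]

-- A's purification loop (two 'continue's, then append)
def pvLinesA (string black white : String) : List (List Char) :=
  (PySem.Chars.splitOn string.toList ['\n']).foldl
    (fun acc line =>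
      if line = [] then acc
      else if !(line.all fun c => decide ([c] = black.toList ∨ [c] = white.toList)) then acc
      else acc ++ [line]) []

-- A's inner loop: for i, char in enumerate(chunk): if char == black: byte += 2 ** i
def pvByteA (black : String) (chunk : List Char) : Int :=
  (PySem.List.enumerate chunk 0).foldl
    (fun byte p => if [p.2] = black.toList then byte + 2 ^ p.1.toNat else byte) 0

def ascii_to_xbm (string : String) (black : String) (white : String) : String :=
  let lines := pvLinesA string black white
  -- len(max(lines, key=len)); lines = [] (ValueError in Python) is outside Pre_
  let width := ((PySem.List.max? lines (fun l => l.length)).getD []).length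
  let height := lines.length
  -- "".join(map(lambda l: l.ljust(width, white), lines)); white of length 1 on Pre_
  let stream := PySem.Chars.join []
    (lines.map (fun l => l ++ List.replicate (width - l.length) (white.toList.getD 0 ' ')))
  -- partition(stream, 8) = [stream[i:i+8] for i in range(0, len(stream), 8)]
  let databytes :=
    ((PySem.List.pyRange 0 (stream.length : Int) 8).map
        (fun i => PySem.List.slice stream (some i) (some (i + 8)))).foldl
      (fun acc chunk => acc ++ [pvFmtByte (pvByteA black chunk)]) []
  String.ofList
    ("\n    #define im_width ".toList ++ PySem.Int.toChars (width : Int) ++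
     "\n    #define im_height ".toList ++ PySem.Int.toChars (height : Int) ++
     "\n    static char im_bits[] = {\n".toList ++ PySem.Chars.join [','] databytes ++
     "\n};\n    ".toList)

-- ===== PORT B =====

-- B's comprehension filter
def pvLinesB (string black white : String) : List (List Char) :=
  (PySem.Chars.splitOn string.toList ['\n']).filter
    (fun l => !(decide (l = [])) &&
      l.all (fun c => decide ([c] = black.toList) || decide ([c] = white.toList)))

-- B's byte_at(j): bit b comes from cell i = 8*j + b, read as lines[i // width][i % width],
-- with the white fill standing in for columns beyond the line's end
def pvByteB (lines : List (List Char)) (width : Nat) (black white : String)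
    (total : Nat) (j : Nat) : Int :=
  (List.range 8).foldl (fun byte b =>
    let i := 8 * j + b
    if i < total then
      let line := lines.getD (i / width) []
      let col := i % width
      let ch := if col < line.length then [line.getD col ' '] else white.toList
      if ch = black.toList then byte + 2 ^ b else byte
    else byte) 0

def ascii_to_xbm_alt (string : String) (black : String) (white : String) : String :=
  let lines := pvLinesB string black white
  let width := ((PySem.List.max? lines (fun l => l.length)).getD []).length
  let height := lines.length
  let total := width * height
  let databytes := (List.range ((total + 7) / 8)).map
      (fun j => pvFmtByte (pvByteB lines width black white total j))
  String.ofList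
    ("\n    #define im_width ".toList ++ PySem.Int.toChars (width : Int) ++
     "\n    #define im_height ".toList ++ PySem.Int.toChars (height : Int) ++
     "\n    static char im_bits[] = {\n".toList ++ PySem.Chars.join [','] databytes ++
     "\n};\n    ".toList)

-- ===== PRECONDITION & SPEC =====
-- Pre_ excludes exactly the inputs where the Python A raises: no surviving line after the filter
-- (max of an empty sequence raises ValueError) or a fill-character argument of length other than 1
-- (str.ljust raises TypeError).
def Pre_ascii_to_xbm (string : String) (black : String) (white : String) : Prop :=
  (PySem.Chars.splitOn string.toList ['\n']).any
    (fun l => !(decide (l = [])) &&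
      l.all (fun c => decide ([c] = black.toList) || decide ([c] = white.toList))) = true
  ∧ white.toList.length = 1
instance (string : String) (black : String) (white : String) :
    Decidable (Pre_ascii_to_xbm string black white) := by unfold Pre_ascii_to_xbm; infer_instance

def pvWitness_ascii_to_xbm : String × String × String := ("# \n##", "#", " ")

def Spec_ascii_to_xbm (string : String) (black : String) (white : String) (out : String) : Prop := out = ascii_to_xbm_alt string black white
instance (string : String) (black : String) (white : String) (out : String) : Decidable (Spec_ascii_to_xbm string black white out) := by unfold Spec_ascii_to_xbm; infer_instance

-- ===== CLAIM (what is proved, stated in full; the proofs are below) =====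
def Claim_equal_ascii_to_xbm : Prop := ∀ (string : String) (black : String) (white : String), Dom_ascii_to_xbm string black white → Pre_ascii_to_xbm string black white → Spec_ascii_to_xbm string black white (ascii_to_xbm string black white)


-- ===== LEMMAS AND PROOFS =====

-- "".join with an empty separator is flatten
theorem pvJoinNil : ∀ (xs : List (List Char)), PySem.Chars.join [] xs = xs.flatten := by
  intro xs
  show List.intercalate [] xs = xs.flatten
  induction xs with
  | nil => rfl
  | cons a t ih =>
    cases t with
    | nil => simp [List.intercalate]
    | cons b t2 =>
      simp only [List.intercalate] at *
      simp only [List.intersperse_cons₂, List.flatten_cons] at *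
      simp [ih]

-- the two line filters agree
theorem pvAll_eq (black white : String) (line : List Char) :
    (line.all fun c => decide ([c] = black.toList ∨ [c] = white.toList)) =
    (line.all fun c => decide ([c] = black.toList) || decide ([c] = white.toList)) := by
  rw [Bool.eq_iff_iff]
  simp [List.all_eq_true]

theorem pvLines_eq (string black white : String) :
    pvLinesA string black white = pvLinesB string black white := by
  unfold pvLinesA pvLinesB
  have h : (fun (acc : List (List Char)) (line : List Char) =>
      if line = [] then acc
      else if !(line.all fun c => decide ([c] = black.toList ∨ [c] = white.toList)) then acc
      else acc ++ [line]) =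
      (fun acc line =>
        if (!(decide (line = [])) &&
            line.all (fun c => decide ([c] = black.toList) || decide ([c] = white.toList))) = true
        then acc ++ [line] else acc) := by
    funext acc line
    rw [← pvAll_eq black white line]
    by_cases h1 : line = []
    · simp [h1]
    · rw [if_neg h1, decide_eq_false h1]
      cases h2 : (line.all fun c => decide ([c] = black.toList ∨ [c] = white.toList)) <;> simp
  rw [h, PySem.List.foldl_append_if
        (fun line => !(decide (line = [])) &&
          line.all (fun c => decide ([c] = black.toList) || decide ([c] = white.toList)))
        (fun l => l)]
  simp

-- sum of bits of s, LSB weight 2^k for the first character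
def pvBits (black : String) : List Char → Nat → Int
  | [], _ => 0
  | c :: t, k => (if [c] = black.toList then 2 ^ k else 0) + pvBits black t (k + 1)

theorem pvByteA_loop (black : String) :
    ∀ (s : List Char) (k : Nat) (b : Int),
      (PySem.List.enumerate s (k : Int)).foldl
        (fun byte p => if [p.2] = black.toList then byte + 2 ^ p.1.toNat else byte) b
      = b + pvBits black s k := by
  intro s
  induction s with
  | nil => intro k b; simp [PySem.List.enumerate_nil, pvBits]
  | cons c t ih =>
    intro k b
    rw [PySem.List.enumerate_cons]
    have hk : (k : Int) + 1 = ((k + 1 : Nat) : Int) := by push_cast; ring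
    simp only [List.foldl_cons, hk, ih]
    by_cases hc : [c] = black.toList <;> simp [hc, pvBits, Int.toNat_natCast] <;> ring

theorem pvByteA_eq (black : String) (chunk : List Char) :
    pvByteA black chunk = pvBits black chunk 0 := by
  have := pvByteA_loop black chunk 0 0
  simpa [pvByteA] using this

-- A's partition over pyRange, written over List.range
theorem partitionA_eq (s : List Char) :
    (PySem.List.pyRange 0 (s.length : Int) 8).map
      (fun i => PySem.List.slice s (some i) (some (i + 8)))
    = (List.range ((s.length + 7) / 8)).map (fun k => (s.drop (8 * k)).take 8) := by
  have h0 : PySem.List.pyRange 0 (s.length : Int) 8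
      = (List.range ((s.length + 7) / 8)).map (fun k => ((8 * k : Nat) : Int)) := by
    rw [PySem.List.pyRange_of_pos _ _ (by norm_num)]
    by_cases hl : 0 < s.length
    · rw [if_pos (by exact_mod_cast hl)]
      have hcnt : (((s.length : Int) - 0 + 8 - 1) / 8).toNat = (s.length + 7) / 8 := by
        have : ((s.length : Int) - 0 + 8 - 1) = ((s.length + 7 : Nat) : Int) := by push_cast; ring
        rw [this]
        rw [show ((8 : Int) = ((8 : Nat) : Int)) from rfl, ← Int.natCast_div, Int.toNat_natCast]
      rw [hcnt]
      apply List.map_congr_left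
      intro k _
      push_cast; ring
    · have : s.length = 0 := by omega
      rw [if_neg (by simp [this]), this]
      simp
  rw [h0, List.map_map]
  apply List.map_congr_left
  intro k _
  show PySem.List.slice s (some ((8 * k : Nat) : Int)) (some (((8 * k : Nat) : Int) + 8)) = _
  rw [show (((8 * k : Nat) : Int) + 8) = (((8 * k : Nat) : Int) + ((8 : Nat) : Int)) from by push_cast; ring]
  rw [PySem.List.slice_natCast_add]

-- a foldl over consecutive indices reading s is the bit-sum of the corresponding chunk
theorem bits_foldl (black : String) (s : List Char) :
    ∀ (n k m : Nat) (acc : Int),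
      (List.range' k n).foldl (fun byte b =>
        if m + b < s.length then
          (if [s.getD (m + b) ' '] = black.toList then byte + 2 ^ b else byte)
        else byte) acc
      = acc + pvBits black ((s.drop (m + k)).take n) k := by
  intro n
  induction n with
  | zero => intro k m acc; simp [pvBits]
  | succ n ih =>
    intro k m acc
    rw [List.range'_succ, List.foldl_cons]
    by_cases hmk : m + k < s.length
    · have hdrop : s.drop (m + k) = s[m + k] :: s.drop (m + k + 1) :=
        List.drop_eq_getElem_cons hmk
      have hgetD : s.getD (m + k) ' ' = s[m + k] := List.getD_eq_getElem s ' ' hmk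
      rw [hdrop, List.take_succ_cons]
      have ih' := ih (k + 1) m
      rw [show m + (k + 1) = m + k + 1 from by omega] at ih'
      by_cases hc : [s[m + k]] = black.toList
      · rw [if_pos hmk, hgetD, if_pos hc, ih', pvBits, if_pos hc]; ring
      · rw [if_pos hmk, hgetD, if_neg hc, ih', pvBits, if_neg hc]; ring
    · have hd1 : s.drop (m + k) = [] := List.drop_eq_nil_of_le (by omega)
      have hd2 : s.drop (m + (k + 1)) = [] := List.drop_eq_nil_of_le (by omega)
      rw [if_neg hmk, ih (k + 1) m acc, hd1, hd2]
      simp [pvBits]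

-- indexing a flatten of equal-length rows
theorem flat_getD (w : Nat) :
    ∀ (ls : List (List Char)), (∀ l ∈ ls, l.length = w) →
      ∀ i : Nat, i < w * ls.length →
        ls.flatten.getD i ' ' = (ls.getD (i / w) []).getD (i % w) ' ' := by
  intro ls
  induction ls with
  | nil => intro _ i h; simp at h
  | cons x t ih =>
    intro hw i h
    have hx : x.length = w := hw x (by simp)
    have hwpos : 0 < w := by
      by_contra h0
      have : w = 0 := by omega
      simp [this] at h
    rw [List.flatten_cons]
    by_cases hi : i < w
    · rw [List.getD_append _ _ _ _ (by omega), Nat.div_eq_of_lt hi, Nat.mod_eq_of_lt hi]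
      simp
    · obtain ⟨r, rfl⟩ : ∃ r, i = r + w := ⟨i - w, by omega⟩
      rw [List.getD_append_right _ _ _ _ (by omega), hx, Nat.add_sub_cancel,
          Nat.add_div_right _ hwpos, Nat.add_mod_right]
      simp only [List.getD_cons_succ]
      apply ih (fun l hl => hw l (by simp [hl])) r
      simp only [List.length_cons] at h
      have hms : w * (t.length + 1) = w * t.length + w := by ring
      omega

-- reading a padded row
theorem pad_getD (w : Nat) (c0 : Char) (l : List Char) (col : Nat)
    (hl : l.length ≤ w) (hc : col < w) :
    (l ++ List.replicate (w - l.length) c0).getD col ' '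
    = if col < l.length then l.getD col ' ' else c0 := by
  by_cases h : col < l.length
  · rw [if_pos h, List.getD_append _ _ _ _ h]
  · rw [if_neg h, List.getD_append_right _ _ _ _ (by omega)]
    rw [List.getD_eq_getElem?_getD, List.getElem?_replicate]
    rw [if_pos (by omega)]
    rfl

-- length of the padded stream
theorem flat_len (w : Nat) :
    ∀ (ls : List (List Char)), (∀ l ∈ ls, l.length = w) →
      ls.flatten.length = w * ls.length := by
  intro ls
  induction ls with
  | nil => intro _; simp
  | cons x t ih =>
    intro hw
    rw [List.flatten_cons, List.length_append, hw x (by simp),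
        ih (fun l hl => hw l (by simp [hl]))]
    simp [Nat.mul_succ]; ring

-- per-byte agreement: A's chunk byte = B's indexed byte
theorem byte_eq (black white : String) (lines : List (List Char)) (width : Nat)
    (hle : ∀ l ∈ lines, l.length ≤ width)
    (hwhite : white.toList = [white.toList.getD 0 ' ']) (j : Nat) :
    pvBits black
      ((((lines.map (fun l => l ++ List.replicate (width - l.length) (white.toList.getD 0 ' '))).flatten).drop
          (8 * j)).take 8) 0
    = pvByteB lines width black white (width * lines.length) j := by
  set w0 := white.toList.getD 0 ' ' with hw0
  set padded := lines.map (fun l => l ++ List.replicate (width - l.length) w0) with hpad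
  have hplen : ∀ p ∈ padded, p.length = width := by
    intro p hp
    rw [hpad] at hp
    obtain ⟨l, hl, rfl⟩ := List.mem_map.mp hp
    have := hle l hl
    simp [List.length_append, List.length_replicate]
    omega
  have hslen : padded.flatten.length = width * lines.length := by
    rw [flat_len width padded hplen, hpad, List.length_map]
  unfold pvByteB
  rw [List.range_eq_range']
  have hfun : (fun (byte : Int) (b : Nat) =>
      let i := 8 * j + b
      if i < width * lines.length then
        let line := lines.getD (i / width) []
        let col := i % width
        let ch := if col < line.length then [line.getD col ' '] else white.toList
        if ch = black.toList then byte + 2 ^ b else byte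
      else byte)
      = (fun byte b =>
        if 8 * j + b < padded.flatten.length then
          (if [padded.flatten.getD (8 * j + b) ' '] = black.toList then byte + 2 ^ b else byte)
        else byte) := by
    funext byte b
    rw [hslen]
    by_cases hi : 8 * j + b < width * lines.length
    · simp only [hi, if_true]
      have hwpos : 0 < width := by
        by_contra h0
        have : width = 0 := by omega
        simp [this] at hi
      have hrow : (8 * j + b) / width < lines.length :=
        Nat.div_lt_of_lt_mul (by omega)
      have hcol : (8 * j + b) % width < width := Nat.mod_lt _ hwpos
      have hlen2 : padded.length = lines.length := by rw [hpad]; simp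
      have hget : padded.flatten.getD (8 * j + b) ' '
          = (padded.getD ((8 * j + b) / width) []).getD ((8 * j + b) % width) ' ' := by
        apply flat_getD width padded hplen
        rw [hlen2]; omega
      have hrowp : padded.getD ((8 * j + b) / width) []
          = (lines.getD ((8 * j + b) / width) []) ++
            List.replicate (width - (lines.getD ((8 * j + b) / width) []).length) w0 := by
        rw [hpad, List.getD_eq_getElem?_getD, List.getElem?_map,
            List.getD_eq_getElem?_getD, List.getElem?_eq_getElem hrow]
        simp
      have hline : lines.getD ((8 * j + b) / width) [] ∈ lines := by
        rw [List.getD_eq_getElem?_getD, List.getElem?_eq_getElem hrow]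
        exact List.getElem_mem _
      rw [hget, hrowp, pad_getD width w0 _ _ (hle _ hline) hcol]
      by_cases hc : (8 * j + b) % width < (lines.getD ((8 * j + b) / width) []).length
      · simp only [hc, if_true]
      · simp only [hc, if_false]
        rw [hwhite]
    · simp only [hi, if_false]
  rw [hfun, bits_foldl black padded.flatten 8 0 (8 * j) 0]
  simp

-- ===== VERDICT (by name: the statement is the Claim_ definition above) =====
set_option maxHeartbeats 1000000 in
theorem ascii_to_xbm_spec : Claim_equal_ascii_to_xbm := by
  intro s bl wh _ hpre
  obtain ⟨hany, hwh⟩ := hpre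
  show Spec_ascii_to_xbm s bl wh (ascii_to_xbm s bl wh)
  unfold Spec_ascii_to_xbm ascii_to_xbm ascii_to_xbm_alt
  rw [pvLines_eq]
  dsimp only
  set lines := pvLinesB s bl wh with hlines
  set width := ((PySem.List.max? lines (fun l => l.length)).getD []).length with hwidth
  -- lines is nonempty
  have hne : lines ≠ [] := by
    rw [hlines]
    unfold pvLinesB
    intro h
    rw [List.filter_eq_nil_iff] at h
    rw [List.any_eq_true] at hany
    obtain ⟨l, hl, hp⟩ := hany
    exact absurd hp (by simpa using h l hl)
  -- every line's length is at most width
  have hle : ∀ l ∈ lines, l.length ≤ width := by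
    intro l hl
    cases hmax : PySem.List.max? lines (fun l => l.length) with
    | none => exact absurd ((PySem.List.max?_eq_none_iff _ _).mp hmax) hne
    | some m =>
      have := PySem.List.max?_isMax hmax l hl
      rw [hwidth, hmax]
      simpa using this
  have hwhite : wh.toList = [wh.toList.getD 0 ' '] := by
    cases h : wh.toList with
    | nil => rw [h] at hwh; simp at hwh
    | cons c t =>
      rw [h] at hwh
      simp at hwh
      simp [hwh]
  -- the padded stream
  set w0 := wh.toList.getD 0 ' ' with hw0
  set padded := lines.map (fun l => l ++ List.replicate (width - l.length) w0) with hpad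
  have hjoin : PySem.Chars.join [] padded = padded.flatten := pvJoinNil padded
  have hplen : ∀ p ∈ padded, p.length = width := by
    intro p hp
    rw [hpad] at hp
    obtain ⟨l, hl, rfl⟩ := List.mem_map.mp hp
    have := hle l hl
    simp [List.length_append, List.length_replicate]
    omega
  have hslen : (PySem.Chars.join [] padded).length = width * lines.length := by
    rw [hjoin, flat_len width padded hplen, hpad, List.length_map]
  congr 1
  -- the databyte lists agree
  rw [PySem.List.foldl_append_singleton_eq_map, List.nil_append, List.map_map]
  have hdb : (List.map
        ((fun chunk => pvFmtByte (pvByteA bl chunk)) ∘ fun i =>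
          PySem.List.slice (PySem.Chars.join [] padded) (some i) (some (i + 8)))
        (PySem.List.pyRange 0 ((PySem.Chars.join [] padded).length : Int) 8))
      = List.map (fun j => pvFmtByte (pvByteB lines width bl wh (width * lines.length) j))
        (List.range ((width * lines.length + 7) / 8)) := by
    rw [← List.map_map, partitionA_eq (PySem.Chars.join [] padded), List.map_map, hslen]
    apply List.map_congr_left
    intro j _
    show pvFmtByte (pvByteA bl _) = pvFmtByte (pvByteB lines width bl wh (width * lines.length) j)
    rw [pvByteA_eq, hjoin, hpad]
    rw [byte_eq bl wh lines width hle hwhite j]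
  rw [hdb]
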